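-- pv_equiv track=rewrite | github.com/ksomemo/Competitive-programming | atcoder/abc/127/D.py | TLE
-- ===== SOURCE A (Python) =====
-- def TLE(N, M, A, BC):
--     for b, c in BC:
--         A = sorted(A)
--         for i in range(b):
--             if A[i] < c:
--                 A[i] = c
--             else:
--                 break
--
--     ans = sum(A)
--     return ans
-- ===== SOURCE B (Python) =====
-- def TLE(N, M, A, BC):
--     n = len(A)
--     cards = []
--     for b, c in sorted(BC, key=lambda t: t[1], reverse=True):
--         if len(cards) >= n:
--             break
--         cards.extend([c] * min(b, n - len(cards)))
--     top = sorted(A + cards, reverse=True)[:n]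
--     return sum(top)
-- ===== Notes on version B (the rewrite author's own statement) =====
-- stated objective: faster
-- what changed: Instead of re-sorting the whole array and replacing a prefix for every operation, B sorts the operations once by card value descending, builds at most N replacement cards, and sums the N largest of the array plus those cards with a single sort.
import Mathlib
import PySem

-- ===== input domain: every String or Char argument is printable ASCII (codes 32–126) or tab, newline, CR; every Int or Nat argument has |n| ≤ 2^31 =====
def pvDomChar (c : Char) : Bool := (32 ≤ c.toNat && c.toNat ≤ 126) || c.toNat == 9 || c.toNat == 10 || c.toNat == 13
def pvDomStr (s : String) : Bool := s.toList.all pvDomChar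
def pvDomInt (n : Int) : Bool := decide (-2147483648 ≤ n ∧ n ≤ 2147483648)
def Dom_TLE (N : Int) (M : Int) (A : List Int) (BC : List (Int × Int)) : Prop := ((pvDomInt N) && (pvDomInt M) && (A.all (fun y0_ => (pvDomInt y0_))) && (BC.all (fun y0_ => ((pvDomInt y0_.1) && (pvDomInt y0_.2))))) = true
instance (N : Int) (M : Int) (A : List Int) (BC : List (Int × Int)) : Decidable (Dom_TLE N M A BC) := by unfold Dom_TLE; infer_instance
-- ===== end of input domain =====

-- B replaces A's per-operation re-sort-and-replace loop by one descending sort of the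
-- operations, at most len(A) replacement cards, and a single sort picking the len(A)
-- largest values; objective: faster (measured).

-- ===== PORT A =====
-- inner 'for i in range(b): if A[i] < c: A[i] = c else: break' loop; none = IndexError
def TLE_inner (S : List Int) (b c : Int) (i : Int) : Option (List Int) :=
  if _h : i < b then
    match PySem.List.pyGet? S i with
    | none => none
    | some v =>
      if v < c then TLE_inner (PySem.List.pySetD S i c) b c (i + 1) else some S
  else some S
termination_by (b - i).toNat
decreasing_by omega

-- 'for b, c in BC: A = sorted(A); <inner loop>'; none = IndexError
def TLE_loop (S : List Int) (ops : List (Int × Int)) : Option (List Int) :=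
  match ops with
  | [] => some S
  | (b, c) :: rest =>
    match TLE_inner (PySem.List.sorted S (fun x => x) false) b c 0 with
    | none => none
    | some S' => TLE_loop S' rest

def TLE (N : Int) (M : Int) (A : List Int) (BC : List (Int × Int)) : Int :=
  match TLE_loop A BC with
  | none => 0   -- Python raises IndexError here; excluded by Pre_TLE
  | some S => S.sum

-- ===== PORT B =====
-- 'for b, c in sorted(BC, key=…, reverse=True): if len(cards) >= n: break; cards.extend(…)'
def TLE_alt_cards (n : Int) (ops : List (Int × Int)) (cards : List Int) : List Int :=
  match ops with
  | [] => cards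
  | (b, c) :: rest =>
    if n ≤ (cards.length : Int) then cards
    else TLE_alt_cards n rest (cards ++ List.replicate (min b (n - (cards.length : Int))).toNat c)

def TLE_alt (N : Int) (M : Int) (A : List Int) (BC : List (Int × Int)) : Int :=
  let n : Int := A.length
  let cards := TLE_alt_cards n (PySem.List.sorted BC (fun t => t.2) true) []
  -- 'sorted(A + cards, reverse=True)[:n]' — slice [:n] with 0 ≤ n is take n
  let top := (PySem.List.sorted (A ++ cards) (fun x => x) true).take n.toNat
  top.sum

-- ===== PRECONDITION & SPEC =====
-- Pre_TLE excludes exactly the inputs where A raises IndexError: some op j asks for more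
-- replacements than len(A) while every value available then (an original element, or an
-- earlier op's card that was applied) is smaller than its c, so the inner loop runs off
-- the end of the list.
def Pre_TLE (N : Int) (M : Int) (A : List Int) (BC : List (Int × Int)) : Prop :=
  ∀ j : Nat, ∀ _hj : j < BC.length, (A.length : Int) < BC[j].1 →
    (∃ x ∈ A, BC[j].2 ≤ x) ∨ ∃ i : Nat, ∃ _hi : i < j, 1 ≤ BC[i].1 ∧ BC[j].2 ≤ BC[i].2
instance (N : Int) (M : Int) (A : List Int) (BC : List (Int × Int)) : Decidable (Pre_TLE N M A BC) := by unfold Pre_TLE; infer_instance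

def pvWitness_TLE : Int × Int × List Int × (List (Int × Int)) := (2, 2, [1, 3], [(1, 2), (2, 5)])

def Spec_TLE (N : Int) (M : Int) (A : List Int) (BC : List (Int × Int)) (out : Int) : Prop := out = TLE_alt N M A BC
instance (N : Int) (M : Int) (A : List Int) (BC : List (Int × Int)) (out : Int) : Decidable (Spec_TLE N M A BC out) := by unfold Spec_TLE; infer_instance

-- ===== CLAIM (what is proved, stated in full; the proofs are below) =====
def Claim_equal_TLE : Prop := ∀ (N : Int) (M : Int) (A : List Int) (BC : List (Int × Int)), Dom_TLE N M A BC → Pre_TLE N M A BC → Spec_TLE N M A BC (TLE N M A BC)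

-- ===== LEMMAS AND PROOFS =====

-- the sorted(A) of A's loop
def sortA (S : List Int) : List Int := PySem.List.sorted S (fun x => x) false

-- what one operation of A does to the (multi)set of values
def stepL (S : List Int) (b c : Int) : List Int :=
  List.replicate (min b.toNat ((sortA S).takeWhile (fun x => decide (x < c))).length) c ++
    (sortA S).drop (min b.toNat ((sortA S).takeWhile (fun x => decide (x < c))).length)

def foldStep : List Int → List (Int × Int) → List Int
  | S, [] => S
  | S, (b, c) :: rest => foldStep (stepL S b c) rest

-- all replacement cards, clamped per-op to n, in operation order
def cardsOf (n : Int) (ops : List (Int × Int)) : List Int :=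
  ops.flatMap (fun p => List.replicate (min p.1 n).toNat p.2)

-- the n largest elements of X, in ascending order
def topnL (n : Nat) (X : List Int) : List Int := (sortA X).drop (X.length - n)

-- stepwise no-IndexError condition
def SafeFrom : List Int → List (Int × Int) → Prop
  | _, [] => True
  | S, (b, c) :: rest => (b ≤ (S.length : Int) ∨ ∃ x ∈ S, c ≤ x) ∧ SafeFrom (stepL S b c) rest

theorem sortA_pairwise (S : List Int) : (sortA S).Pairwise (fun a b => a ≤ b) :=
  PySem.List.sorted_pairwise S (fun x => x)

theorem sortA_perm (S : List Int) : (sortA S).Perm S := PySem.List.sorted_perm S (fun x => x) false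

theorem length_sortA (S : List Int) : (sortA S).length = S.length :=
  PySem.List.length_sorted S (fun x => x) false

theorem dropWhile_ge (T : List Int) (c : Int) (hT : T.Pairwise (fun a b => a ≤ b)) :
    ∀ y ∈ T.dropWhile (fun x => decide (x < c)), c ≤ y := by
  induction T with
  | nil => simp
  | cons a t ih =>
    intro y hy
    by_cases hac : a < c
    · rw [List.dropWhile_cons_of_pos (by simpa using hac)] at hy
      exact ih hT.tail y hy
    · rw [List.dropWhile_cons_of_neg (by simpa using hac)] at hy
      rcases List.mem_cons.mp hy with rfl | hy
      · omega
      · have := List.rel_of_pairwise_cons hT hy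
        omega

theorem takeWhile_lt (T : List Int) (c : Int) :
    ∀ y ∈ T.takeWhile (fun x => decide (x < c)), y < c := by
  intro y hy
  simpa using List.mem_takeWhile_imp hy

theorem drop_takeWhile_length (T : List Int) (p : Int → Bool) :
    T.drop (T.takeWhile p).length = T.dropWhile p := by
  nth_rewrite 2 [← List.takeWhile_append_dropWhile (p := p) (l := T)]
  rw [List.drop_left]

theorem drop_split (T : List Int) (p : Int → Bool) (k : Nat) (h : k ≤ (T.takeWhile p).length) :
    T.drop k = (T.takeWhile p).drop k ++ T.dropWhile p := by
  nth_rewrite 1 [← List.takeWhile_append_dropWhile (p := p) (l := T)]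
  rw [List.drop_append_of_le_length h]

theorem inner_run_aux (T : List Int) (b c : Int) (hT : T.Pairwise (fun a b => a ≤ b))
    (hsafe : b ≤ (T.length : Int) ∨ ∃ x ∈ T, c ≤ x) :
    ∀ m j : Nat, min b.toNat (T.takeWhile (fun x => decide (x < c))).length - j = m →
      j ≤ min b.toNat (T.takeWhile (fun x => decide (x < c))).length →
      TLE_inner (List.replicate j c ++ T.drop j) b c (j : Int) =
        some (List.replicate (min b.toNat (T.takeWhile (fun x => decide (x < c))).length) c ++
          T.drop (min b.toNat (T.takeWhile (fun x => decide (x < c))).length)) := by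
  set P := T.takeWhile (fun x => decide (x < c)) with hP
  set k := min b.toNat P.length with hk
  have hPpre : P <+: T := List.takeWhile_prefix _
  have hpT : P.length ≤ T.length := hPpre.sublist.length_le
  intro m
  induction m with
  | zero =>
    intro j hm hj
    have hjk : j = k := by omega
    subst hjk
    rw [TLE_inner]
    by_cases hb : (k : Int) < b
    · have hkP : k = P.length := by omega
      rw [dif_pos hb]
      by_cases hkT : k < T.length
      · have hget : PySem.List.pyGet? (List.replicate k c ++ T.drop k) (k : Int) = some T[k] := by
          rw [PySem.List.pyGet?_natCast,
            List.getElem?_append_right (by simp : (List.replicate k c).length ≤ k)]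
          simp [hkT]
        rw [hget]
        have hTk : c ≤ T[k] := by
          apply dropWhile_ge T c hT
          rw [← drop_takeWhile_length T (fun x => decide (x < c)), ← hP, ← hkP,
            List.drop_eq_getElem_cons hkT]
          exact List.mem_cons_self
        dsimp only
        rw [if_neg (by omega)]
      · -- k = T.length: the Python IndexError case; excluded by hsafe
        exfalso
        have hkT' : k = T.length := by omega
        have hPT : P = T := hPpre.sublist.eq_of_length (by omega)
        rcases hsafe with h | ⟨x, hx, hcx⟩
        · omega
        · have : x < c := takeWhile_lt T c x (by rw [← hP, hPT]; exact hx)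
          omega
    · rw [dif_neg hb]
  | succ m ih =>
    intro j hm hj
    have hjk : j < k := by omega
    have hjP : j < P.length := by omega
    have hjT : j < T.length := by omega
    rw [TLE_inner]
    have hb : (j : Int) < b := by omega
    rw [dif_pos hb]
    have hget : PySem.List.pyGet? (List.replicate j c ++ T.drop j) (j : Int) = some T[j] := by
      rw [PySem.List.pyGet?_natCast,
        List.getElem?_append_right (by simp : (List.replicate j c).length ≤ j)]
      simp [hjT]
    rw [hget]
    dsimp only
    have hTj : T[j] < c := by
      have hPj : P[j]'hjP = T[j] := hPpre.getElem hjP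
      have := takeWhile_lt T c (P[j]'hjP) (List.getElem_mem hjP)
      omega
    rw [if_pos hTj]
    have hset : PySem.List.pySetD (List.replicate j c ++ T.drop j) (↑j) c =
        List.replicate (j + 1) c ++ T.drop (j + 1) := by
      rw [PySem.List.pySetD_natCast, List.set_append]
      rw [if_neg (by simp)]
      simp only [List.length_replicate, Nat.sub_self]
      rw [List.drop_eq_getElem_cons hjT, List.set_cons_zero, List.replicate_succ']
      simp
    rw [hset]
    have hcast : (j : Int) + 1 = ((j + 1 : Nat) : Int) := by push_cast; ring
    rw [hcast]
    exact ih (j + 1) (by omega) (by omega)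

theorem inner_run (T : List Int) (b c : Int) (hT : T.Pairwise (fun a b => a ≤ b))
    (hsafe : b ≤ (T.length : Int) ∨ ∃ x ∈ T, c ≤ x) :
    TLE_inner T b c 0 =
      some (List.replicate (min b.toNat (T.takeWhile (fun x => decide (x < c))).length) c ++
        T.drop (min b.toNat (T.takeWhile (fun x => decide (x < c))).length)) := by
  have h := inner_run_aux T b c hT hsafe (min b.toNat (T.takeWhile (fun x => decide (x < c))).length) 0 (by omega) (by omega)
  simpa using h

theorem length_stepL (S : List Int) (b c : Int) : (stepL S b c).length = S.length := by
  have hp : ((sortA S).takeWhile (fun x => decide (x < c))).length ≤ S.length := by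
    have h := (List.takeWhile_sublist (l := sortA S) (fun x => decide (x < c))).length_le
    rw [length_sortA] at h; exact h
  unfold stepL
  simp only [List.length_append, List.length_replicate, List.length_drop, length_sortA]
  omega

theorem loop_eq (ops : List (Int × Int)) : ∀ S : List Int, SafeFrom S ops →
    TLE_loop S ops = some (foldStep S ops) := by
  induction ops with
  | nil => intro S _; rfl
  | cons p rest ih =>
    obtain ⟨b, c⟩ := p
    intro S hs
    obtain ⟨hsafe, hrest⟩ := hs
    have hsafe' : b ≤ ((sortA S).length : Int) ∨ ∃ x ∈ sortA S, c ≤ x := by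
      rw [length_sortA]
      rcases hsafe with h | ⟨x, hx, hcx⟩
      · exact Or.inl h
      · exact Or.inr ⟨x, (PySem.List.mem_sorted _ _ _ _).mpr hx, hcx⟩
    have hrun := inner_run (sortA S) b c (sortA_pairwise S) hsafe'
    unfold sortA at hrun
    simp only [TLE_loop, foldStep, hrun]
    exact ih _ hrest

theorem step_perm (S : List Int) (b c : Int) :
    (stepL S b c).Perm (topnL S.length (S ++ List.replicate (min b (S.length : Int)).toNat c)) := by
  set P := (sortA S).takeWhile (fun x => decide (x < c)) with hP
  set Q := (sortA S).dropWhile (fun x => decide (x < c)) with hQ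
  set k' := (min b (S.length : Int)).toNat with hk'
  set k := min b.toNat P.length with hk
  have hTPQ : sortA S = P ++ Q := (List.takeWhile_append_dropWhile).symm
  have hpT : P.length ≤ S.length := by
    have h := (List.takeWhile_sublist (l := sortA S) (fun x => decide (x < c))).length_le
    rw [length_sortA] at h; exact h
  have hkk : k = min k' P.length := by omega
  have hkp : k ≤ P.length := by omega
  have hPc : ∀ x ∈ P, x < c := takeWhile_lt (sortA S) c
  have hQc : ∀ y ∈ Q, c ≤ y := dropWhile_ge (sortA S) c (sortA_pairwise S)
  have hPQ : ∀ x ∈ P, ∀ y ∈ Q, x ≤ y := by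
    have h := sortA_pairwise S
    rw [hTPQ] at h
    exact (List.pairwise_append.mp h).2.2
  have h1 : sortA (S ++ List.replicate k' c) = P ++ (List.replicate k' c ++ Q) := by
    apply PySem.List.sorted_id_eq_of_perm_of_pairwise
    · have hps : (P ++ Q).Perm S := by rw [← hTPQ]; exact sortA_perm S
      refine (List.Perm.append_left P List.perm_append_comm).trans ?_
      rw [← List.append_assoc]
      exact List.Perm.append_right _ hps
    · refine List.pairwise_append.mpr ⟨List.Pairwise.sublist (List.takeWhile_sublist _) (sortA_pairwise S),
        List.pairwise_append.mpr ⟨List.pairwise_replicate_of_refl, List.Pairwise.sublist (List.dropWhile_sublist _) (sortA_pairwise S), ?_⟩, ?_⟩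
      · intro a ha y hy
        rw [List.eq_of_mem_replicate ha]
        exact hQc y hy
      · intro x hx y hy
        rcases List.mem_append.mp hy with hy | hy
        · rw [List.eq_of_mem_replicate hy]
          exact le_of_lt (hPc x hx)
        · exact hPQ x hx y hy
  have h2 : topnL S.length (S ++ List.replicate k' c) = (P ++ (List.replicate k' c ++ Q)).drop k' := by
    unfold topnL
    rw [h1]
    congr 1
    simp
  have h3 : (P ++ (List.replicate k' c ++ Q)).drop k' = P.drop k ++ (List.replicate k c ++ Q) := by
    rcases Nat.lt_or_ge P.length k' with h | h
    · have hkeq : k = P.length := by omega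
      have hsplit : k' = P.length + (k' - P.length) := by omega
      nth_rewrite 1 [hsplit]
      rw [List.drop_length_add_append, List.drop_append_of_le_length (by simp),
        List.drop_replicate]
      have h5 : k' - (k' - P.length) = P.length := by omega
      rw [h5, hkeq, List.drop_length, List.nil_append]
    · have hkeq : k = k' := by omega
      rw [List.drop_append_of_le_length h, hkeq]
  have h4 : stepL S b c = List.replicate k c ++ (P.drop k ++ Q) := by
    unfold stepL
    rw [← hP, ← hk, drop_split (sortA S) _ k hkp, ← hQ]
  rw [h4, h2, h3, ← List.append_assoc, ← List.append_assoc]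
  exact List.Perm.append_right _ List.perm_append_comm

theorem topn_perm (n : Nat) (X Y : List Int) (h : X.Perm Y) : topnL n X = topnL n Y := by
  unfold topnL sortA
  rw [PySem.List.sorted_eq_sorted_of_perm X Y (fun x => x) (fun _ _ h => h) h, h.length_eq]

theorem topn_cons_small (n : Nat) (d : Int) (W : List Int)
    (h : n ≤ W.countP (fun x => decide (d ≤ x))) : topnL n (d :: W) = topnL n W := by
  set V := sortA W with hV
  set Vlo := V.takeWhile (fun x => decide (x < d)) with hVlo
  set Vhi := V.dropWhile (fun x => decide (x < d)) with hVhi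
  have hsplit : V = Vlo ++ Vhi := (List.takeWhile_append_dropWhile).symm
  have hge : ∀ y ∈ Vhi, d ≤ y := dropWhile_ge V d (sortA_pairwise W)
  have hlt : ∀ y ∈ Vlo, y < d := takeWhile_lt V d
  have hlen : W.length = Vlo.length + Vhi.length := by
    have := congrArg List.length hsplit
    rw [length_sortA] at this
    simpa using this
  have hcount : W.countP (fun x => decide (d ≤ x)) = Vhi.length := by
    rw [(sortA_perm W).symm.countP_congr (fun x _ => rfl), ← hV, hsplit, List.countP_append,
      List.countP_eq_zero.mpr (by intro x hx; simpa using not_le.mpr (hlt x hx)),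
      List.countP_eq_length.mpr (by intro x hx; simpa using hge x hx)]
    simp
  have hn : n ≤ Vhi.length := by omega
  have h1 : sortA (d :: W) = Vlo ++ d :: Vhi := by
    apply PySem.List.sorted_id_eq_of_perm_of_pairwise
    · refine List.perm_middle.trans ?_
      rw [← hsplit]
      exact (sortA_perm W).cons d |>.symm.symm
    · refine List.pairwise_append.mpr ⟨List.Pairwise.sublist (List.takeWhile_sublist _) (sortA_pairwise W),
        List.pairwise_cons.mpr ⟨fun y hy => hge y hy, List.Pairwise.sublist (List.dropWhile_sublist _) (sortA_pairwise W)⟩, ?_⟩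
      intro x hx y hy
      rcases List.mem_cons.mp hy with rfl | hy
      · exact le_of_lt (hlt x hx)
      · exact le_of_lt (lt_of_lt_of_le (hlt x hx) (hge y hy))
  unfold topnL
  rw [h1, ← hV, hsplit]
  rw [List.append_cons Vlo d Vhi]
  have hL : (d :: W).length - n = (Vlo ++ [d]).length + (Vhi.length - n) := by simp; omega
  have hR : W.length - n = Vlo.length + (Vhi.length - n) := by omega
  rw [hL, hR, List.drop_length_add_append, List.drop_length_add_append]

theorem topn_append_small (n : Nat) (D W : List Int)
    (h : ∀ d ∈ D, n ≤ W.countP (fun x => decide (d ≤ x))) : topnL n (D ++ W) = topnL n W := by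
  induction D with
  | nil => simp
  | cons d D' ih =>
    rw [List.cons_append, topn_cons_small n d (D' ++ W) ?_, ih ?_]
    · intro e he
      exact h e (List.mem_cons_of_mem d he)
    · rw [List.countP_append]
      have := h d List.mem_cons_self
      omega

theorem topn_topn (n : Nat) (X Y : List Int) (h : n ≤ X.length) :
    topnL n (topnL n X ++ Y) = topnL n (X ++ Y) := by
  set V := sortA X with hV
  set D := V.take (X.length - n) with hD
  have hU : topnL n X = V.drop (X.length - n) := rfl
  have hVDU : V = D ++ V.drop (X.length - n) := (List.take_append_drop _ _).symm
  have hlenV : V.length = X.length := length_sortA X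
  have hlenU : (V.drop (X.length - n)).length = n := by simp [hlenV]; omega
  have hcross : ∀ x ∈ D, ∀ y ∈ V.drop (X.length - n), x ≤ y := by
    have hp := sortA_pairwise X
    rw [← hV, hVDU] at hp
    exact (List.pairwise_append.mp hp).2.2
  have hperm : (X ++ Y).Perm (D ++ (topnL n X ++ Y)) := by
    rw [← List.append_assoc, hU, ← hVDU]
    exact List.Perm.append_right Y (sortA_perm X).symm
  rw [topn_perm n (X ++ Y) (D ++ (topnL n X ++ Y)) hperm]
  rw [topn_append_small n D (topnL n X ++ Y) ?_]
  intro d hd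
  rw [List.countP_append]
  have : (topnL n X).countP (fun x => decide (d ≤ x)) = n := by
    rw [hU, List.countP_eq_length.mpr (by intro y hy; simpa using hcross d hd y hy), hlenU]
  omega

theorem loop_sum (ops : List (Int × Int)) : ∀ S : List Int, SafeFrom S ops →
    (foldStep S ops).sum = (topnL S.length (S ++ cardsOf (S.length : Int) ops)).sum := by
  induction ops with
  | nil =>
    intro S _
    simp only [foldStep, cardsOf, List.flatMap_nil, List.append_nil]
    unfold topnL
    rw [Nat.sub_self, List.drop_zero]
    exact ((sortA_perm S).sum_eq).symm
  | cons p rest ih =>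
    obtain ⟨b, c⟩ := p
    intro S hs
    obtain ⟨_hsafe, hrest⟩ := hs
    have h1 : foldStep S ((b, c) :: rest) = foldStep (stepL S b c) rest := rfl
    rw [h1, ih (stepL S b c) hrest, length_stepL]
    congr 1
    rw [topn_perm S.length _ _ (List.Perm.append_right (cardsOf (S.length : Int) rest) (step_perm S b c))]
    rw [topn_topn S.length (S ++ List.replicate (min b (S.length : Int)).toNat c) _ (by simp)]
    rw [List.append_assoc]
    rfl

theorem step_mono (S : List Int) (b c t : Int) (h : ∃ x ∈ S, t ≤ x) :
    ∃ x ∈ stepL S b c, t ≤ x := by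
  obtain ⟨x, hx, htx⟩ := h
  have hxT : x ∈ sortA S := (PySem.List.mem_sorted _ _ _ _).mpr hx
  unfold stepL
  set P := (sortA S).takeWhile (fun x => decide (x < c)) with hP
  set k := min b.toNat P.length with hk
  by_cases hk0 : k = 0
  · exact ⟨x, by rw [hk0]; simpa using hxT, htx⟩
  · have hkp : k ≤ P.length := by omega
    rw [drop_split (sortA S) _ k hkp, ← hP]
    nth_rewrite 1 [← List.takeWhile_append_dropWhile (p := fun x => decide (x < c)) (l := sortA S)] at hxT
    rcases List.mem_append.mp hxT with hxP | hxQ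
    · refine ⟨c, List.mem_append.mpr (Or.inl (List.mem_replicate.mpr ⟨hk0, rfl⟩)), ?_⟩
      have := takeWhile_lt (sortA S) c x hxP
      omega
    · exact ⟨x, List.mem_append.mpr (Or.inr (List.mem_append.mpr (Or.inr hxQ))), htx⟩

theorem step_has_c (S : List Int) (b c : Int) (hb : 1 ≤ b) (hS : S ≠ []) :
    ∃ x ∈ stepL S b c, c ≤ x := by
  unfold stepL
  set P := (sortA S).takeWhile (fun x => decide (x < c)) with hP
  set k := min b.toNat P.length with hk
  by_cases hp0 : P.length = 0
  · have hk0 : k = 0 := by omega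
    have hPnil : P = [] := List.length_eq_zero_iff.mp hp0
    have hQ : (sortA S).dropWhile (fun x => decide (x < c)) = sortA S := by
      conv_rhs => rw [← List.takeWhile_append_dropWhile (p := fun x => decide (x < c)) (l := sortA S)]
      rw [← hP, hPnil, List.nil_append]
    have hne : sortA S ≠ [] := by
      intro hnil
      exact hS (List.Perm.eq_nil ((sortA_perm S).symm.trans (hnil ▸ List.Perm.refl _)))
    obtain ⟨y, hy⟩ := List.exists_mem_of_ne_nil _ hne
    refine ⟨y, ?_, dropWhile_ge (sortA S) c (sortA_pairwise S) y (hQ.symm ▸ hy)⟩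
    rw [hk0]
    simpa using hy
  · have hk0 : k ≠ 0 := by omega
    exact ⟨c, List.mem_append.mpr (Or.inl (List.mem_replicate.mpr ⟨hk0, rfl⟩)), le_refl c⟩

theorem pre_safe (ops : List (Int × Int)) : ∀ S : List Int,
    (∀ j : Nat, ∀ _hj : j < ops.length, (S.length : Int) < ops[j].1 →
      (∃ x ∈ S, ops[j].2 ≤ x) ∨ ∃ i : Nat, ∃ _hi : i < j, 1 ≤ ops[i].1 ∧ ops[j].2 ≤ ops[i].2) →
    SafeFrom S ops := by
  induction ops with
  | nil => intro S _; trivial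
  | cons p rest ih =>
    obtain ⟨b, c⟩ := p
    intro S h
    constructor
    · by_cases hb : b ≤ (S.length : Int)
      · exact Or.inl hb
      · rcases h 0 (by simp) (by simpa using not_le.mp hb) with hx | ⟨i, hi, _⟩
        · exact Or.inr (by simpa using hx)
        · omega
    · apply ih
      intro j hj hlen
      rw [length_stepL] at hlen
      have hj' : j + 1 < ((b, c) :: rest).length := by simpa using hj
      have h' := h (j + 1) hj' (by simpa using hlen)
      simp only [List.getElem_cons_succ] at h'
      rcases h' with ⟨x, hx, hcx⟩ | ⟨i, hi, hb1, hc1⟩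
      · exact Or.inl (step_mono S b c _ ⟨x, hx, hcx⟩)
      · match i, hi with
        | 0, _ =>
          simp only [List.getElem_cons_zero] at hb1 hc1
          by_cases hS : S = []
          · exfalso
            subst hS
            rcases h 0 (by simp) (by simp; omega) with hx | ⟨i', hi', _⟩
            · simp at hx
            · omega
          · obtain ⟨x, hx, hcx⟩ := step_has_c S b c hb1 hS
            exact Or.inl ⟨x, hx, by omega⟩
        | i' + 1, hi =>
          refine Or.inr ⟨i', by omega, ?_⟩
          simpa using ⟨hb1, hc1⟩

theorem sortedRev_eq (X : List Int) :
    PySem.List.sorted X (fun x => x) true = (sortA X).reverse := by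
  refine List.Perm.eq_of_pairwise (le := fun a b : Int => b ≤ a)
    (fun a b _ _ h1 h2 => le_antisymm h2 h1) (PySem.List.sorted_pairwise_rev X (fun x => x)) ?_ ?_
  · exact List.pairwise_reverse.mpr (by simpa using sortA_pairwise X)
  · exact (PySem.List.sorted_perm X (fun x => x) true).trans
      ((sortA_perm X).symm.trans (List.reverse_perm _).symm)

theorem altCards_eq (n : Nat) (ops : List (Int × Int)) : ∀ cards : List Int,
    TLE_alt_cards (n : Int) ops cards = cards ++ (cardsOf (n : Int) ops).take (n - cards.length) := by
  induction ops with
  | nil => intro cards; simp [TLE_alt_cards, cardsOf]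
  | cons p rest ih =>
    obtain ⟨b, c⟩ := p
    intro cards
    by_cases hc : (n : Int) ≤ (cards.length : Int)
    · rw [TLE_alt_cards, if_pos hc]
      have : n - cards.length = 0 := by omega
      rw [this, List.take_zero, List.append_nil]
    · rw [TLE_alt_cards, if_neg hc, ih]
      have hcards : cardsOf (n : Int) ((b, c) :: rest) =
          List.replicate (min b (n : Int)).toNat c ++ cardsOf (n : Int) rest := rfl
      rw [hcards, List.take_append, List.take_replicate, List.append_assoc]
      simp only [List.length_append, List.length_replicate]
      have h2 : n - (cards.length + (min b ((n : Int) - (cards.length : Int))).toNat) =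
          n - cards.length - (min b (n : Int)).toNat := by omega
      have h1 : (min b ((n : Int) - (cards.length : Int))).toNat =
          min (n - cards.length) (min b (n : Int)).toNat := by omega
      rw [h2, h1]

theorem cards_desc (n : Int) (ops : List (Int × Int))
    (h : ops.Pairwise (fun a b => b.2 ≤ a.2)) :
    (cardsOf n ops).Pairwise (fun x y => y ≤ x) := by
  induction ops with
  | nil => simp [cardsOf]
  | cons p rest ih =>
    have hstep : cardsOf n (p :: rest) = List.replicate (min p.1 n).toNat p.2 ++ cardsOf n rest := rfl
    rw [hstep]
    refine List.pairwise_append.mpr ⟨List.pairwise_replicate_of_refl, ih h.tail, ?_⟩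
    intro x hx y hy
    rw [List.eq_of_mem_replicate hx]
    obtain ⟨q, hq, hyq⟩ := List.mem_flatMap.mp hy
    rw [List.eq_of_mem_replicate hyq]
    exact List.rel_of_pairwise_cons h hq

theorem topn_take (n : Nat) (A Cs : List Int) (h : Cs.Pairwise (fun x y => y ≤ x)) :
    topnL n (A ++ Cs.take n) = topnL n (A ++ Cs) := by
  by_cases hlen : Cs.length ≤ n
  · rw [List.take_of_length_le hlen]
  · have hperm : (A ++ Cs).Perm (Cs.drop n ++ (A ++ Cs.take n)) := by
      conv_lhs => rw [← List.take_append_drop n Cs]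
      rw [← List.append_assoc]
      exact List.perm_append_comm
    rw [topn_perm n _ _ hperm, topn_append_small n (Cs.drop n) (A ++ Cs.take n) ?_]
    intro d hd
    have hcross : ∀ x ∈ Cs.take n, d ≤ x := by
      have hp := h
      rw [← List.take_append_drop n Cs] at hp
      intro x hx
      exact (List.pairwise_append.mp hp).2.2 x hx d hd
    rw [List.countP_append]
    have : (Cs.take n).countP (fun x => decide (d ≤ x)) = n := by
      rw [List.countP_eq_length.mpr (by intro y hy; simpa using hcross y hy)]
      rw [List.length_take]
      omega
    omega

theorem alt_eq_topn (N M : Int) (A : List Int) (BC : List (Int × Int)) :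
    TLE_alt N M A BC = (topnL A.length (A ++ cardsOf (A.length : Int) BC)).sum := by
  unfold TLE_alt
  simp only
  rw [altCards_eq A.length (PySem.List.sorted BC (fun t => t.2) true) []]
  rw [List.nil_append, List.length_nil, Nat.sub_zero]
  rw [sortedRev_eq, List.take_reverse, List.sum_reverse, length_sortA, Int.toNat_natCast]
  have hstep : ((sortA (A ++ (cardsOf (↑A.length) (PySem.List.sorted BC (fun t => t.2) true)).take A.length)).drop
      ((A ++ (cardsOf (↑A.length) (PySem.List.sorted BC (fun t => t.2) true)).take A.length).length - A.length)).sum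
      = (topnL A.length (A ++ (cardsOf (↑A.length) (PySem.List.sorted BC (fun t => t.2) true)).take A.length)).sum := rfl
  rw [hstep, topn_take A.length A _ (cards_desc _ _ (PySem.List.sorted_pairwise_rev BC (fun t => t.2)))]
  congr 1
  exact topn_perm A.length _ _ (List.Perm.append_left A
    (List.Perm.flatMap_right _ (PySem.List.sorted_perm BC (fun t => t.2) true)))

-- ===== VERDICT (by name: the statement is the Claim_ definition above) =====
theorem TLE_spec : Claim_equal_TLE := by
  intro N M A BC _hdom hpre
  show TLE N M A BC = TLE_alt N M A BC
  have hsafe : SafeFrom A BC := pre_safe BC A hpre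
  have h1 : TLE N M A BC = (foldStep A BC).sum := by
    unfold TLE; rw [loop_eq BC A hsafe]
  rw [h1, loop_sum BC A hsafe, alt_eq_topn]
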